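-- pv_equiv track=rewrite | github.com/selfint/py_LNS | lns2/safe_interval_table.py | find_range_changes
-- ===== SOURCE A (Python) =====
-- def find_range_changes(timestamps):
--     if not timestamps:
--         return []
--     result = []
--     for i in range(len(timestamps)):
--         if i == 0:  # Add the first number
--             result.append(timestamps[i])
--         elif timestamps[i] != timestamps[i - 1] + 1:  # Gap detected
--             result.append(timestamps[i - 1] + 1)  # End of previous range
--             result.append(timestamps[i])  # Start of new range
--     result.append(timestamps[-1] + 1)
--     return result
-- ===== SOURCE B (Python) =====
-- def find_range_changes(timestamps):
--     # Build maximal runs of consecutive integers as (start, last) pairs, then emit boundaries.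
--     runs = []
--     for v in timestamps:
--         if runs and v == runs[-1][1] + 1:
--             runs[-1] = (runs[-1][0], v)
--         else:
--             runs.append((v, v))
--     out = []
--     for s, e in runs:
--         out += [s, e + 1]
--     return out
-- ===== Notes on version B (the rewrite author's own statement) =====
-- stated objective: alternative
-- what changed: Replaces A's single index-based pass (emitting boundaries on the fly with ts[i-1] lookups) with a build-then-emit decomposition: one value pass grouping the list into maximal consecutive runs as (start,last) pairs, then a second pass emitting [start, last+1] per run.
import Mathlib
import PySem

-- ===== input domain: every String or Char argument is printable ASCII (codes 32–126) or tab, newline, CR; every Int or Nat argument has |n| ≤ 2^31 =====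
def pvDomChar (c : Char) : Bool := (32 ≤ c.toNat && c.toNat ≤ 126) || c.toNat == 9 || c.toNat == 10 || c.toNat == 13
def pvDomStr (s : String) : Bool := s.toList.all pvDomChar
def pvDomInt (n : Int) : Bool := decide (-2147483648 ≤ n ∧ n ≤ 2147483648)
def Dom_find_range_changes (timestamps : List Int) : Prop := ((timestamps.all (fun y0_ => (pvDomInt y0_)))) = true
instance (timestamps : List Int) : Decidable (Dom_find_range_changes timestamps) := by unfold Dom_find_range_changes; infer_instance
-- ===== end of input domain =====

-- B builds the maximal consecutive runs first and then emits [start, last+1] per run,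
-- instead of A's single index pass; same cost, alternative decomposition (return values proved equal).

-- ===== PORT A =====
-- Literal port of A: loop over i in range(len(ts)); ts[i] / ts[i-1] via PySem.List.pyGetD
-- (exact: every index the loop uses is in range), ts[-1] via pyGetD at -1.
def find_range_changes (timestamps : List Int) : List Int :=
  if timestamps = [] then []
  else
    let result := (PySem.List.pyRange 0 (timestamps.length : Int) 1).foldl
      (fun result i =>
        if i = 0 then result ++ [PySem.List.pyGetD timestamps i 0]
        else if PySem.List.pyGetD timestamps i 0 ≠ PySem.List.pyGetD timestamps (i - 1) 0 + 1 then
          result ++ [PySem.List.pyGetD timestamps (i - 1) 0 + 1, PySem.List.pyGetD timestamps i 0]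
        else result) []
    result ++ [PySem.List.pyGetD timestamps (-1) 0 + 1]

-- ===== PORT B =====
-- Literal port of Source B: first loop folds the values into runs : List (Int × Int)
-- (runs[-1] read/update = getLast? / dropLast ++ [·]); second loop emits the boundary list.
def find_range_changes_alt (timestamps : List Int) : List Int :=
  let runs := timestamps.foldl
    (fun runs v =>
      match runs.getLast? with
      | some (s, p) => if v = p + 1 then runs.dropLast ++ [(s, v)] else runs ++ [(v, v)]
      | none => runs ++ [(v, v)]) ([] : List (Int × Int))
  runs.foldl (fun out r => out ++ [r.1, r.2 + 1]) []

-- ===== PRECONDITION & SPEC =====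
def Spec_find_range_changes (timestamps : List Int) (out : List Int) : Prop := out = find_range_changes_alt timestamps
instance (timestamps : List Int) (out : List Int) : Decidable (Spec_find_range_changes timestamps out) := by unfold Spec_find_range_changes; infer_instance

-- ===== CLAIM (what is proved, stated in full; the proofs are below) =====
def Claim_equal_find_range_changes : Prop := ∀ (timestamps : List Int), Dom_find_range_changes timestamps → Spec_find_range_changes timestamps (find_range_changes timestamps)

-- ===== LEMMAS AND PROOFS =====

-- Canonical recursion both ports are reduced to: boundaries after a current element `p`.
def pvCore (p : Int) : List Int → List Int
  | [] => [p + 1]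
  | y :: ys => if y = p + 1 then pvCore y ys else (p + 1) :: y :: pvCore y ys

-- A's loop body without the final "last + 1" element.
def pvPCore (p : Int) : List Int → List Int
  | [] => []
  | y :: ys => if y = p + 1 then pvPCore y ys else (p + 1) :: y :: pvPCore y ys

def pvLastD (a : Int) : List Int → Int
  | [] => a
  | y :: ys => pvLastD y ys

lemma pvCore_eq (p : Int) (l : List Int) : pvCore p l = pvPCore p l ++ [pvLastD p l + 1] := by
  induction l generalizing p with
  | nil => rfl
  | cons y ys ih => simp only [pvCore, pvPCore, pvLastD]; split_ifs <;> simp [ih]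

lemma pvLastD_eq (a : Int) (l : List Int) : (a :: l).getLast? = some (pvLastD a l) := by
  induction l generalizing a with
  | nil => rfl
  | cons y ys ih => rw [List.getLast?_cons_cons, ih]; rfl

lemma pvGetD_neg_one (a : Int) (l : List Int) :
    PySem.List.pyGetD (a :: l) (-1) 0 = pvLastD a l := by
  simp [PySem.List.pyGetD, PySem.List.pyGet?_neg_one, pvLastD_eq]

def pvStep (ts : List Int) (result : List Int) (i : Int) : List Int :=
  if i = 0 then result ++ [PySem.List.pyGetD ts i 0]
  else if PySem.List.pyGetD ts i 0 ≠ PySem.List.pyGetD ts (i - 1) 0 + 1 then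
    result ++ [PySem.List.pyGetD ts (i - 1) 0 + 1, PySem.List.pyGetD ts i 0]
  else result

lemma pvGetD_append_len (pref : List Int) (x : Int) (suf : List Int) :
    PySem.List.pyGetD (pref ++ x :: suf) (pref.length : Int) 0 = x := by
  simp [PySem.List.pyGetD]

lemma pvA_loop (suf : List Int) (pref : List Int) (p : Int) (acc : List Int) :
    (PySem.List.pyRange ((pref.length : Int) + 1) ((pref ++ p :: suf).length : Int) 1).foldl
      (pvStep (pref ++ p :: suf)) acc = acc ++ pvPCore p suf := by
  induction suf generalizing pref p acc with
  | nil =>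
    rw [PySem.List.pyRange_one_eq_nil (by simp)]
    simp [pvPCore]
  | cons y ys ih =>
    rw [PySem.List.pyRange_one_cons
      (by simp only [List.length_append, List.length_cons]; push_cast; omega)]
    rw [List.foldl_cons]
    have hy : PySem.List.pyGetD (pref ++ p :: y :: ys) ((pref.length : Int) + 1) 0 = y := by
      have := pvGetD_append_len (pref ++ [p]) y ys
      simp at this
      simpa using this
    have hp : PySem.List.pyGetD (pref ++ p :: y :: ys) ((pref.length : Int) + 1 - 1) 0 = p := by
      have := pvGetD_append_len pref p (y :: ys)
      simp only [show (pref.length : Int) + 1 - 1 = (pref.length : Int) by ring]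
      exact this
    have hstep : pvStep (pref ++ p :: y :: ys) acc ((pref.length : Int) + 1)
        = if y = p + 1 then acc else acc ++ [p + 1, y] := by
      unfold pvStep
      rw [if_neg (by omega), hy, hp]
      split_ifs <;> first | rfl | omega
    rw [hstep]
    have ihh := ih (pref ++ [p]) y
    have hlist : (pref ++ [p]) ++ y :: ys = pref ++ p :: y :: ys := by simp
    have hlen : ((pref ++ [p]).length : Int) + 1 = (pref.length : Int) + 2 := by simp; omega
    rw [hlist, hlen] at ihh
    have harr : ((pref.length : Int) + 1) + 1 = (pref.length : Int) + 2 := by ring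
    rw [harr, ihh]
    simp only [pvPCore]
    split_ifs <;> simp

lemma pvA_eq (a : Int) (l : List Int) :
    find_range_changes (a :: l) = a :: pvCore a l := by
  unfold find_range_changes
  rw [if_neg (by simp)]
  show ((PySem.List.pyRange 0 (((a :: l).length : Int)) 1).foldl (pvStep (a :: l)) [])
      ++ [PySem.List.pyGetD (a :: l) (-1) 0 + 1] = _
  rw [PySem.List.pyRange_one_cons
    (by simp only [List.length_cons]; push_cast; omega)]
  rw [List.foldl_cons]
  have h0 : pvStep (a :: l) [] 0 = [a] := by
    unfold pvStep
    rw [if_pos rfl]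
    simp [PySem.List.pyGetD]
  rw [h0]
  have hloop := pvA_loop l [] a [a]
  have h1 : ((List.length ([] : List Int) : Int)) + 1 = 0 + 1 := by simp
  rw [h1, List.nil_append] at hloop
  rw [hloop, pvGetD_neg_one, pvCore_eq]
  simp

-- B's run builder as a structural recursion on (current run, remaining values).
def pvG (s p : Int) : List Int → List (Int × Int)
  | [] => [(s, p)]
  | v :: vs => if v = p + 1 then pvG s v vs else (s, p) :: pvG v v vs

lemma pvB_loop (l : List Int) (R : List (Int × Int)) (s p : Int) :
    l.foldl (fun runs v =>
      match runs.getLast? with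
      | some (s, p) => if v = p + 1 then runs.dropLast ++ [(s, v)] else runs ++ [(v, v)]
      | none => runs ++ [(v, v)]) (R ++ [(s, p)]) = R ++ pvG s p l := by
  induction l generalizing R s p with
  | nil => simp [pvG]
  | cons v vs ih =>
    rw [List.foldl_cons]
    have hlast : (R ++ [(s, p)]).getLast? = some (s, p) := by simp
    simp only [hlast]
    by_cases h : v = p + 1
    · rw [if_pos h]
      rw [List.dropLast_concat]
      rw [ih R s v]
      simp [pvG, h]
    · rw [if_neg h]
      rw [ih (R ++ [(s, p)]) v v]
      simp [pvG, h]

lemma pvEmit_g (l : List Int) (s p : Int) (acc : List Int) :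
    (pvG s p l).foldl (fun out r => out ++ [r.1, r.2 + 1]) acc = acc ++ s :: pvCore p l := by
  induction l generalizing s p acc with
  | nil => simp [pvG, pvCore]
  | cons v vs ih =>
    simp only [pvG, pvCore]
    split_ifs with h
    · rw [ih]
    · rw [List.foldl_cons, ih]
      simp

lemma pvB_eq (a : Int) (l : List Int) :
    find_range_changes_alt (a :: l) = a :: pvCore a l := by
  unfold find_range_changes_alt
  simp only [List.foldl_cons]
  rw [show (match ([] : List (Int × Int)).getLast? with
      | some (s, p) => if a = p + 1 then ([] : List (Int × Int)).dropLast ++ [(s, a)] else [] ++ [(a, a)]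
      | none => [] ++ [(a, a)]) = [] ++ [(a, a)] from rfl]
  rw [pvB_loop l [] a a]
  have := pvEmit_g l a a []
  simpa using this

-- ===== VERDICT (by name: the statement is the Claim_ definition above) =====
theorem find_range_changes_spec : Claim_equal_find_range_changes := by
  intro ts _
  unfold Spec_find_range_changes
  cases ts with
  | nil => rfl
  | cons a l => rw [pvA_eq, pvB_eq]
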